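-- pv_equiv track=rewrite | github.com/kathoum/classroom_material_downloader | download.py | choose_mime_type
-- ===== SOURCE A (Python) =====
-- from typing import List
--
-- def choose_mime_type(choices: List[str], document_type: str):
--     fmt = [t for t in choices if 'vnd.openxmlformats-officedocument' in t] or \
--         [t for t in choices if 'vnd.oasis.opendocument' in t] or \
--         [t for t in choices if 'application/pdf' in t] or \
--         [t for t in choices if t.startswith('image/')] or \
--         choices
--     if fmt:
--         return fmt[0]
--     if document_type == 'application/vnd.google-apps.document':
--         return 'application/vnd.openxmlformats-officedocument.wordprocessingml.document'
--     if document_type == 'application/vnd.google-apps.spreadsheet':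
--         return 'application/vnd.openxmlformats-officedocument.spreadsheetml.sheet'
--     if document_type == 'application/vnd.google-apps.presentation':
--         return 'application/vnd.openxmlformats-officedocument.presentationml.presentation'
--     if document_type == 'application/vnd.google-apps.drawing':
--         return 'application/pdf'
--     else:
--         return document_type
-- ===== SOURCE B (Python) =====
-- _FALLBACK = {
--     'application/vnd.google-apps.document':
--         'application/vnd.openxmlformats-officedocument.wordprocessingml.document',
--     'application/vnd.google-apps.spreadsheet':
--         'application/vnd.openxmlformats-officedocument.spreadsheetml.sheet',
--     'application/vnd.google-apps.presentation':
--         'application/vnd.openxmlformats-officedocument.presentationml.presentation',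
--     'application/vnd.google-apps.drawing':
--         'application/pdf',
-- }
--
--
-- def _rank(t):
--     if 'vnd.openxmlformats-officedocument' in t:
--         return 0
--     if 'vnd.oasis.opendocument' in t:
--         return 1
--     if 'application/pdf' in t:
--         return 2
--     if t.startswith('image/'):
--         return 3
--     return 4
--
--
-- def choose_mime_type(choices, document_type):
--     if not choices:
--         return _FALLBACK.get(document_type, document_type)
--     return min(choices, key=_rank)
-- ===== Notes on version B (the rewrite author's own statement) =====
-- stated objective: alternative
-- what changed: Replaced A's four chained filter passes over choices by a single pass keeping the first element of minimal priority rank (min with a key function), and A's fallback if-chain by a dictionary lookup with default.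
import Mathlib
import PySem

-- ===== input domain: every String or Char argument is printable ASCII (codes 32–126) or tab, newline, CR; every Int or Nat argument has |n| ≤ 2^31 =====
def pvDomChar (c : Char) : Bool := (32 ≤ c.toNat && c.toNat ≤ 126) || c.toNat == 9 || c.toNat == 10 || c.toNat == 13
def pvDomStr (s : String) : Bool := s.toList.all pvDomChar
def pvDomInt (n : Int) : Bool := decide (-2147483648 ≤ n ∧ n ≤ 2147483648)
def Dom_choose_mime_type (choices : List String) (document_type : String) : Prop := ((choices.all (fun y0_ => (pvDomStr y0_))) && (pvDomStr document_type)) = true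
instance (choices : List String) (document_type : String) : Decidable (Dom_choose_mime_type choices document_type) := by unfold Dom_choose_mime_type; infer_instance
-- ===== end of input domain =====

-- B replaces A's four chained filter passes by a single pass keeping the first element of
-- minimal priority rank, and A's fallback if-chain by a dictionary lookup (objective: alternative).

-- ===== PORT A =====
def choose_mime_type (choices : List String) (document_type : String) : String :=
  let l1 := choices.filter (fun t => PySem.Str.isIn "vnd.openxmlformats-officedocument" t)
  let l2 := choices.filter (fun t => PySem.Str.isIn "vnd.oasis.opendocument" t)
  let l3 := choices.filter (fun t => PySem.Str.isIn "application/pdf" t)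
  let l4 := choices.filter (fun t => PySem.Str.startswith t "image/")
  let fmt := if l1 ≠ [] then l1 else if l2 ≠ [] then l2 else if l3 ≠ [] then l3
             else if l4 ≠ [] then l4 else choices
  match fmt with
  | t :: _ => t
  | [] =>
    if document_type == "application/vnd.google-apps.document" then
      "application/vnd.openxmlformats-officedocument.wordprocessingml.document"
    else if document_type == "application/vnd.google-apps.spreadsheet" then
      "application/vnd.openxmlformats-officedocument.spreadsheetml.sheet"
    else if document_type == "application/vnd.google-apps.presentation" then
      "application/vnd.openxmlformats-officedocument.presentationml.presentation"
    else if document_type == "application/vnd.google-apps.drawing" then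
      "application/pdf"
    else document_type

-- ===== PORT B =====
def pvFallback : PySem.Dict String String :=
  PySem.Dict.ofList
    [ ("application/vnd.google-apps.document",
       "application/vnd.openxmlformats-officedocument.wordprocessingml.document"),
      ("application/vnd.google-apps.spreadsheet",
       "application/vnd.openxmlformats-officedocument.spreadsheetml.sheet"),
      ("application/vnd.google-apps.presentation",
       "application/vnd.openxmlformats-officedocument.presentationml.presentation"),
      ("application/vnd.google-apps.drawing", "application/pdf") ]

def pvRank (t : String) : Int :=
  if PySem.Str.isIn "vnd.openxmlformats-officedocument" t then 0
  else if PySem.Str.isIn "vnd.oasis.opendocument" t then 1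
  else if PySem.Str.isIn "application/pdf" t then 2
  else if PySem.Str.startswith t "image/" then 3
  else 4

-- min(choices, key=_rank): fold keeping the FIRST element of minimal rank (strict <)
def choose_mime_type_alt (choices : List String) (document_type : String) : String :=
  match choices with
  | [] => pvFallback.getD document_type document_type
  | c :: rest => rest.foldl (fun best t => if pvRank t < pvRank best then t else best) c

-- ===== PRECONDITION & SPEC =====
def Spec_choose_mime_type (choices : List String) (document_type : String) (out : String) : Prop := out = choose_mime_type_alt choices document_type
instance (choices : List String) (document_type : String) (out : String) : Decidable (Spec_choose_mime_type choices document_type out) := by unfold Spec_choose_mime_type; infer_instance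

-- ===== CLAIM (what is proved, stated in full; the proofs are below) =====
def Claim_equal_choose_mime_type : Prop := ∀ (choices : List String) (document_type : String), Dom_choose_mime_type choices document_type → Spec_choose_mime_type choices document_type (choose_mime_type choices document_type)

-- ===== LEMMAS AND PROOFS =====

-- A's tier selection on the nonempty list c :: rest, written as chained headD
def pvChain (c : String) (rest : List String) : String :=
  ((c :: rest).filter (fun t => PySem.Str.isIn "vnd.openxmlformats-officedocument" t)).headD
    (((c :: rest).filter (fun t => PySem.Str.isIn "vnd.oasis.opendocument" t)).headD
      (((c :: rest).filter (fun t => PySem.Str.isIn "application/pdf" t)).headD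
        (((c :: rest).filter (fun t => PySem.Str.startswith t "image/")).headD c)))

set_option maxHeartbeats 2000000 in
lemma pvChain_cons (c t : String) (rest : List String) :
    pvChain c (t :: rest) = pvChain (if pvRank t < pvRank c then t else c) rest := by
  cases h0c : PySem.Str.isIn "vnd.openxmlformats-officedocument" c <;>
  cases h1c : PySem.Str.isIn "vnd.oasis.opendocument" c <;>
  cases h2c : PySem.Str.isIn "application/pdf" c <;>
  cases h3c : PySem.Str.startswith c "image/" <;>
  cases h0t : PySem.Str.isIn "vnd.openxmlformats-officedocument" t <;>
  cases h1t : PySem.Str.isIn "vnd.oasis.opendocument" t <;>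
  cases h2t : PySem.Str.isIn "application/pdf" t <;>
  cases h3t : PySem.Str.startswith t "image/" <;>
  simp only [pvChain, pvRank, List.filter_cons, h0c, h1c, h2c, h3c, h0t, h1t, h2t, h3t,
    Int.reduceLT, Bool.false_eq_true, eq_self_iff_true, if_true, if_false,
    List.headD_cons, List.headD_nil]

lemma pvFold_eq_chain (rest : List String) (c : String) :
    rest.foldl (fun best t => if pvRank t < pvRank best then t else best) c = pvChain c rest := by
  induction rest generalizing c with
  | nil =>
    simp only [List.foldl_nil]
    cases h0 : PySem.Str.isIn "vnd.openxmlformats-officedocument" c <;>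
    cases h1 : PySem.Str.isIn "vnd.oasis.opendocument" c <;>
    cases h2 : PySem.Str.isIn "application/pdf" c <;>
    cases h3 : PySem.Str.startswith c "image/" <;>
    simp only [pvChain, List.filter_cons, List.filter_nil, h0, h1, h2, h3,
      Bool.false_eq_true, eq_self_iff_true, if_true, if_false,
      List.headD_cons, List.headD_nil]
  | cons t rest ih =>
    rw [List.foldl_cons, ih, ← pvChain_cons]

lemma pvA_cons (c : String) (rest : List String) (document_type : String) :
    choose_mime_type (c :: rest) document_type = pvChain c rest := by
  cases h0 : (c :: rest).filter (fun t => PySem.Str.isIn "vnd.openxmlformats-officedocument" t) <;>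
  cases h1 : (c :: rest).filter (fun t => PySem.Str.isIn "vnd.oasis.opendocument" t) <;>
  cases h2 : (c :: rest).filter (fun t => PySem.Str.isIn "application/pdf" t) <;>
  cases h3 : (c :: rest).filter (fun t => PySem.Str.startswith t "image/") <;>
  simp only [choose_mime_type, pvChain, h0, h1, h2, h3, ne_eq, List.cons_ne_nil,
    eq_self_iff_true, not_true, not_false_iff, if_true, if_false,
    List.headD_cons, List.headD_nil]

lemma pvEmpty_case (document_type : String) :
    choose_mime_type [] document_type = choose_mime_type_alt [] document_type := by
  by_cases h1 : document_type = "application/vnd.google-apps.document"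
  · subst h1; decide
  · by_cases h2 : document_type = "application/vnd.google-apps.spreadsheet"
    · subst h2; decide
    · by_cases h3 : document_type = "application/vnd.google-apps.presentation"
      · subst h3; decide
      · by_cases h4 : document_type = "application/vnd.google-apps.drawing"
        · subst h4; decide
        · simp only [choose_mime_type, choose_mime_type_alt, pvFallback, PySem.Dict.ofList,
            PySem.Dict.update, List.foldl_cons, List.foldl_nil, List.filter_nil,
            PySem.Dict.getD_insert, PySem.Dict.getD_empty, beq_iff_eq,
            h1, h2, h3, h4, ne_eq, eq_self_iff_true, not_true, if_true, if_false]

-- ===== VERDICT (by name: the statement is the Claim_ definition above) =====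
theorem choose_mime_type_spec : Claim_equal_choose_mime_type := by
  intro choices document_type _
  unfold Spec_choose_mime_type
  cases choices with
  | nil => exact pvEmpty_case document_type
  | cons c rest =>
    rw [pvA_cons]
    show _ = rest.foldl _ c
    rw [pvFold_eq_chain]
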